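-- pv_equiv track=rewrite | github.com/t-veor/adventofcode | 2019/day16/day16.py | fft_second_half_of_input
-- ===== SOURCE A (Python) =====
-- def fft_second_half_of_input(signal, reps, offset, rounds):
--     # when offset > len(signal) * reps / 2,
--     # result[offset] is just sum(signal[offset:])
--     signal = list(signal[i % len(signal)] for i in range(offset, len(signal) * reps))
--
--     for _ in range(rounds):
--         result = [0] * len(signal)
--         first = True
--         for i in range(len(signal) - 1, -1, -1):
--             if first:
--                 first = False
--                 result[i] = signal[i]
--             else:
--                 result[i] = signal[i] + result[i + 1]
--
--         for i in range(len(result)):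
--             result[i] = abs(result[i]) % 10
--
--         signal = result
--
--     return signal
-- ===== SOURCE B (Python) =====
-- def fft_second_half_of_input(sig, reps, offset, rounds):
--     # Same value as A. The tail is built by slicing whole copies of sig
--     # (instead of A's per-index modulo comprehension), and each round runs a
--     # FORWARD pass computing each suffix sum as total-minus-running-prefix
--     # (instead of A's backward suffix-sum array plus a second abs-mod pass).
--     n = len(sig)
--     m = n * reps - offset
--     if m <= 0:
--         tail = []
--     else:
--         start = offset % n
--         tail = (sig[start:] + sig * (m // n + 1))[:m]
--     for _ in range(rounds):
--         total = sum(tail)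
--         out = []
--         p = 0
--         for x in tail:
--             out.append(abs(total - p) % 10)
--             p += x
--         tail = out
--     return tail
-- ===== Notes on version B (the rewrite author's own statement) =====
-- stated objective: alternative
-- what changed: B builds the replicated tail by slicing whole copies of the signal instead of A's per-index modulo comprehension, and each round is one forward pass computing every suffix sum as total-minus-running-prefix, replacing A's backward suffix-sum array fill plus second abs-mod-10 pass.
import Mathlib
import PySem

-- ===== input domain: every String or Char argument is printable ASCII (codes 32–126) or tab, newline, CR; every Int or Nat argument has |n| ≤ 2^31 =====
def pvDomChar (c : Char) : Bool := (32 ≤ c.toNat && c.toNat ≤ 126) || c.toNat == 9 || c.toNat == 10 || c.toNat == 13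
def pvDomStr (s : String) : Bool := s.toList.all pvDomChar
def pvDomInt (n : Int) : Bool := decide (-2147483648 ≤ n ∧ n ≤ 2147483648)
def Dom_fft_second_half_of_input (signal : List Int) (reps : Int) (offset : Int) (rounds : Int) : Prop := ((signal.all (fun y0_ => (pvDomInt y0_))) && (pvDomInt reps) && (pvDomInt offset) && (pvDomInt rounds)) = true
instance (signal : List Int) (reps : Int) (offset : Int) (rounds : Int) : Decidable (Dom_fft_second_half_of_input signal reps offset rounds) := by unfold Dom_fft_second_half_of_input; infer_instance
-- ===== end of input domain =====

-- B builds the tail by slicing whole copies of the signal (not A's per-index modulo comprehension)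
-- and runs each round as one forward total-minus-running-prefix pass (not A's backward suffix-sum
-- array fill plus a second abs-mod-10 pass).

-- ===== PORT A =====
-- A's tail: [signal[i % len(signal)] for i in range(offset, len(signal) * reps)]
def fftTail (signal : List Int) (reps : Int) (offset : Int) : List Int :=
  (PySem.List.pyRange offset ((signal.length : Int) * reps) 1).map
    (fun i => PySem.List.pyGetD signal (PySem.Int.mod i (signal.length : Int)) 0)

-- one round of A: result = [0]*n; backward pass with a `first` flag; then abs-mod-10 pass
def fftRoundA (sig : List Int) : List Int :=
  let st := (PySem.List.pyRange ((sig.length : Int) - 1) (-1) (-1)).foldl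
    (fun (s : List Int × Bool) i =>
      if s.2 then
        (PySem.List.pySetD s.1 i (PySem.List.pyGetD sig i 0), false)
      else
        (PySem.List.pySetD s.1 i
          (PySem.List.pyGetD sig i 0 + PySem.List.pyGetD s.1 (i + 1) 0), false))
    (List.replicate sig.length 0, true)
  (PySem.List.pyRange 0 (st.1.length : Int) 1).foldl
    (fun r i =>
      PySem.List.pySetD r i (PySem.Int.mod ((PySem.List.pyGetD r i 0).natAbs : Int) 10)) st.1

def fft_second_half_of_input (signal : List Int) (reps : Int) (offset : Int) (rounds : Int) : List Int :=
  (PySem.List.pyRange 0 rounds 1).foldl (fun s _ => fftRoundA s) (fftTail signal reps offset)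

-- ===== PORT B =====
-- B's tail: m = n*reps - offset; if m <= 0: [] else (signal[start:] + signal*(m//n + 1))[:m]
-- (`signal * k` is ported as (List.replicate k.toNat signal).flatten — exact for every k: k < 0 gives [])
def fftTailB (signal : List Int) (reps : Int) (offset : Int) : List Int :=
  let n : Int := signal.length
  let m : Int := n * reps - offset
  if m ≤ 0 then []
  else
    let start := PySem.Int.mod offset n
    PySem.List.slice
      (PySem.List.slice signal (some start) none
        ++ (List.replicate (PySem.Int.floordiv m n + 1).toNat signal).flatten)
      none (some m)

-- one round of B: total = sum(tail); forward fold threading (p, out), out gets abs(total-p)%10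
def fftRoundB (l : List Int) : List Int :=
  let total := l.sum
  (l.foldl
    (fun (s : Int × List Int) x =>
      (s.1 + x, s.2 ++ [PySem.Int.mod (((total - s.1).natAbs : Nat) : Int) 10]))
    (0, [])).2

def fft_second_half_of_input_alt (signal : List Int) (reps : Int) (offset : Int) (rounds : Int) : List Int :=
  (PySem.List.pyRange 0 rounds 1).foldl (fun s _ => fftRoundB s) (fftTailB signal reps offset)

-- ===== PRECONDITION & SPEC =====
-- Pre_ excludes only the inputs where the Python A raises ZeroDivisionError (i % len(signal)
-- with an empty signal and a non-empty range, i.e. offset < 0); B raises identically there.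
def Pre_fft_second_half_of_input (signal : List Int) (reps : Int) (offset : Int) (rounds : Int) : Prop :=
  signal = [] → 0 ≤ offset

instance (signal : List Int) (reps : Int) (offset : Int) (rounds : Int) : Decidable (Pre_fft_second_half_of_input signal reps offset rounds) := by unfold Pre_fft_second_half_of_input; infer_instance

def pvWitness_fft_second_half_of_input : List Int × Int × Int × Int := ([1, 2, 3], 3, 4, 2)

def Spec_fft_second_half_of_input (signal : List Int) (reps : Int) (offset : Int) (rounds : Int) (out : List Int) : Prop := out = fft_second_half_of_input_alt signal reps offset rounds
instance (signal : List Int) (reps : Int) (offset : Int) (rounds : Int) (out : List Int) : Decidable (Spec_fft_second_half_of_input signal reps offset rounds out) := by unfold Spec_fft_second_half_of_input; infer_instance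

-- ===== CLAIM (what is proved, stated in full; the proofs are below) =====
def Claim_equal_fft_second_half_of_input : Prop := ∀ (signal : List Int) (reps : Int) (offset : Int) (rounds : Int), Dom_fft_second_half_of_input signal reps offset rounds → Pre_fft_second_half_of_input signal reps offset rounds → Spec_fft_second_half_of_input signal reps offset rounds (fft_second_half_of_input signal reps offset rounds)

-- ===== LEMMAS AND PROOFS =====

-- raw suffix sums: suffS l = [sum l[i:] for i in range(len(l))]
def suffS : List Int → List Int
  | [] => []
  | x :: xs => (x + xs.sum) :: suffS xs

-- Python's abs(x) % 10, the reduction both rounds apply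
def fmod10 (x : Int) : Int := PySem.Int.mod ((x.natAbs : Nat) : Int) 10

theorem suffS_getD_zero (l : List Int) : (suffS l).getD 0 0 = l.sum := by
  cases l <;> simp [suffS]

-- A's backward pass with the flag already false: processing indices j-1 … 0 on a state whose
-- positions ≥ j already hold the suffix sums completes the whole suffix-sum array
theorem loopA_inv (sig : List Int) : ∀ (j : ℕ), j ≤ sig.length →
    ((PySem.List.pyRange ((j : Int) - 1) (-1) (-1)).foldl
      (fun (s : List Int × Bool) i =>
        if s.2 then
          (PySem.List.pySetD s.1 i (PySem.List.pyGetD sig i 0), false)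
        else
          (PySem.List.pySetD s.1 i
            (PySem.List.pyGetD sig i 0 + PySem.List.pyGetD s.1 (i + 1) 0), false))
      (List.replicate j 0 ++ suffS (sig.drop j), false)).1 = suffS sig := by
  intro j
  induction j with
  | zero =>
      intro _
      rw [show ((0:ℕ) : Int) - 1 = -1 by ring, PySem.List.pyRange_neg_one_eq_nil (by omega)]
      simp
  | succ j ih =>
      intro hj
      rw [show ((j+1:ℕ) : Int) - 1 = (j : Int) by push_cast; ring,
          PySem.List.pyRange_neg_one_cons (by omega)]
      simp only [List.foldl_cons, Bool.false_eq_true, if_false]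
      have hget2 : PySem.List.pyGetD (List.replicate (j+1) 0 ++ suffS (sig.drop (j+1))) ((j:Int) + 1) 0
          = (sig.drop (j+1)).sum := by
        rw [show (j:Int) + 1 = ((j+1 : ℕ) : Int) by push_cast; ring, PySem.List.pyGetD_natCast]
        rw [List.getD_append_right _ _ _ _ (by simp)]
        simpa [List.getD] using suffS_getD_zero (sig.drop (j+1))
      have hset : PySem.List.pySetD (List.replicate (j+1) 0 ++ suffS (sig.drop (j+1))) ((j:Int))
            (PySem.List.pyGetD sig (j:Int) 0 + (sig.drop (j+1)).sum)
          = List.replicate j 0 ++ suffS (sig.drop j) := by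
        rw [PySem.List.pySetD_natCast, List.set_append_left _ _ (by simp)]
        rw [@List.replicate_succ' j Int 0,
            List.set_append_right _ _ (by simp : (List.replicate j (0:Int)).length ≤ j)]
        have hdrop : sig.drop j = sig.getD j 0 :: sig.drop (j+1) := by
          rw [List.getD_eq_getElem _ _ (by omega), List.drop_eq_getElem_cons (by omega)]
        rw [hdrop]
        simp [suffS, PySem.List.pyGetD_natCast]
      rw [hget2, hset]
      exact ih (by omega)

-- A's whole backward pass (starting with the flag true) computes the suffix sums
theorem loopA_eq_suffS (sig : List Int) :
    ((PySem.List.pyRange ((sig.length : Int) - 1) (-1) (-1)).foldl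
      (fun (s : List Int × Bool) i =>
        if s.2 then
          (PySem.List.pySetD s.1 i (PySem.List.pyGetD sig i 0), false)
        else
          (PySem.List.pySetD s.1 i
            (PySem.List.pyGetD sig i 0 + PySem.List.pyGetD s.1 (i + 1) 0), false))
      (List.replicate sig.length 0, true)).1 = suffS sig := by
  cases hsig : sig with
  | nil =>
      rw [PySem.List.pyRange_neg_one_eq_nil (by simp)]
      simp [suffS]
  | cons a as =>
      have hlen : sig.length = as.length + 1 := by rw [hsig]; simp
      rw [← hsig]
      rw [hlen, show ((as.length + 1 : ℕ) : Int) - 1 = ((as.length : ℕ) : Int) by push_cast; ring,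
          PySem.List.pyRange_neg_one_cons (by omega)]
      simp only [List.foldl_cons, if_true]
      have hset1 : PySem.List.pySetD (List.replicate (as.length + 1) 0) ((as.length : ℕ) : Int)
            (PySem.List.pyGetD sig ((as.length : ℕ) : Int) 0)
          = List.replicate as.length 0 ++ suffS (sig.drop as.length) := by
        rw [PySem.List.pySetD_natCast, @List.replicate_succ' as.length Int 0,
            List.set_append_right _ _ (by simp : (List.replicate as.length (0:Int)).length ≤ as.length)]
        have hdrop : sig.drop as.length = [sig.getD as.length 0] := by
          rw [List.getD_eq_getElem _ _ (by omega), List.drop_eq_getElem_cons (by omega)]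
          simp [show as.length + 1 = sig.length from hlen.symm]
        rw [hdrop]
        simp [suffS, PySem.List.pyGetD_natCast]
      rw [hset1]
      exact loopA_inv sig as.length (by omega)

-- A's second (abs-mod) loop is an in-place map, proved with the already-mapped prefix explicit
theorem loopMap_gen (f : Int → Int) : ∀ (r2 r1 : List Int),
    (PySem.List.pyRange (r1.length : Int) ((r1.length : Int) + (r2.length : Int)) 1).foldl
      (fun r i => PySem.List.pySetD r i (f (PySem.List.pyGetD r i 0))) (r1 ++ r2)
    = r1 ++ r2.map f := by
  intro r2
  induction r2 with
  | nil => intro r1; simp [PySem.List.pyRange_one_eq_nil]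
  | cons x xs ih =>
      intro r1
      rw [PySem.List.pyRange_one_cons (by push_cast [List.length_cons]; omega)]
      simp only [List.foldl_cons]
      have hget : PySem.List.pyGetD (r1 ++ x :: xs) (r1.length : Int) 0 = x := by
        rw [PySem.List.pyGetD_natCast]
        simp
      have hset : PySem.List.pySetD (r1 ++ x :: xs) (r1.length : Int) (f x) = (r1 ++ [f x]) ++ xs := by
        rw [PySem.List.pySetD_natCast]
        rw [List.set_append_right _ _ (le_refl _)]
        simp
      rw [hget, hset]
      have ihx := ih (r1 ++ [f x])
      have harith : ((r1 ++ [f x]).length : Int) = (r1.length : Int) + 1 := by simp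
      have harith2 : ((r1.length : Int) + ((x :: xs).length : Int)) = ((r1 ++ [f x]).length : Int) + (xs.length : Int) := by
        simp [List.length_cons]; ring
      rw [harith2, ← harith] at *
      rw [ihx]
      simp

theorem loopMap (r : List Int) :
    (PySem.List.pyRange 0 (r.length : Int) 1).foldl
      (fun r i =>
        PySem.List.pySetD r i (PySem.Int.mod ((PySem.List.pyGetD r i 0).natAbs : Int) 10)) r
      = r.map fmod10 := by
  have h := loopMap_gen fmod10 r []
  simpa [fmod10] using h

-- B's forward fold: with total T fixed, threading (p, out) appends fmod10 (T - prefix) for each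
-- position, i.e. fmod10 of (T - p - l.sum) plus each raw suffix sum
theorem loopB_inv (T : Int) (l : List Int) : ∀ (p : Int) (out : List Int),
    l.foldl
      (fun (s : Int × List Int) x =>
        (s.1 + x, s.2 ++ [PySem.Int.mod (((T - s.1).natAbs : Nat) : Int) 10]))
      (p, out)
      = (p + l.sum, out ++ (suffS l).map (fun s => fmod10 (T - p - l.sum + s))) := by
  induction l with
  | nil => intro p out; simp [suffS]
  | cons x xs ih =>
      intro p out
      simp only [List.foldl_cons]
      rw [ih]
      simp only [suffS, List.map_cons, List.sum_cons, Prod.mk.injEq]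
      refine ⟨by ring, ?_⟩
      · have h1 : T - p - (x + xs.sum) + (x + xs.sum) = T - p := by ring
        have h2 : (fun s => fmod10 (T - (p + x) - xs.sum + s)) = (fun s => fmod10 (T - p - (x + xs.sum) + s)) := by
          funext s; congr 1; ring
        rw [h1, h2]
        simp [fmod10, List.append_assoc]

-- one round of B equals fmod10 mapped over the raw suffix sums
theorem fftRoundB_eq (l : List Int) : fftRoundB l = (suffS l).map fmod10 := by
  simp only [fftRoundB]
  rw [loopB_inv]
  simp

-- one round of A equals the same map
theorem fftRoundA_eq (l : List Int) : fftRoundA l = (suffS l).map fmod10 := by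
  simp only [fftRoundA]
  rw [loopA_eq_suffS l, loopMap]

-- the periodic block: signal * k as a range-indexed map (n = signal.length)
theorem flatten_replicate_eq_map (signal : List Int) : ∀ (k : ℕ),
    (List.replicate k signal).flatten
      = (List.range (k * signal.length)).map (fun j => signal.getD (j % signal.length) 0) := by
  intro k
  induction k with
  | zero => simp
  | succ k ih =>
      rw [List.replicate_succ, List.flatten_cons, ih]
      rw [show (k+1) * signal.length = signal.length + k * signal.length by ring, List.range_add,
          List.map_append, List.map_map]
      congr 1
      · refine List.ext_getElem (by simp) ?_
        intro i h1 h2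
        simp at h2
        simp [Nat.mod_eq_of_lt h2, List.getD_eq_getElem?_getD, List.getElem?_eq_getElem h2]
      · refine List.map_congr_left ?_
        intro j _
        simp [Nat.add_mod_left]

-- B's tail equals A's tail (given Pre_)
theorem tail_eq (signal : List Int) (reps offset : Int)
    (hpre : signal = [] → 0 ≤ offset) :
    fftTailB signal reps offset = fftTail signal reps offset := by
  by_cases hm : (signal.length : Int) * reps - offset ≤ 0
  · -- both tails empty
    simp only [fftTailB, if_pos hm, fftTail]
    rw [PySem.List.pyRange_one_eq_nil (by omega)]
    simp
  · -- main case: n > 0 (else Pre_ forces m ≤ 0) and m > 0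
    have hn : 0 < signal.length := by
      rcases Nat.eq_zero_or_pos signal.length with h0 | h
      · exfalso
        have := hpre (List.eq_nil_of_length_eq_zero h0)
        simp [h0] at hm
        omega
      · exact h
    set n : Int := (signal.length : Int) with hns
    have hnpos : 0 < n := by rw [hns]; exact_mod_cast hn
    set m : Int := n * reps - offset with hms
    have hmpos : 0 < m := by omega
    set start : Int := PySem.Int.mod offset n with hss
    have hstart0 : 0 ≤ start := PySem.Int.mod_nonneg _ hnpos
    have hstartn : start < n := PySem.Int.mod_lt _ hnpos
    -- B's list before the final [:m] truncation, as a range-indexed map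
    have hk0 : 0 ≤ PySem.Int.floordiv m n + 1 := by
      have := (PySem.Int.le_floordiv_iff_mul_le (a := m) (b := n) (q := 0) hnpos).mpr (by omega)
      omega
    have hbig : PySem.List.slice signal (some start) none
          ++ (List.replicate (PySem.Int.floordiv m n + 1).toNat signal).flatten
        = (List.range ((signal.length - start.toNat) + (PySem.Int.floordiv m n + 1).toNat * signal.length)).map
            (fun j => signal.getD ((start.toNat + j) % signal.length) 0) := by
      rw [PySem.List.slice_from signal hstart0, flatten_replicate_eq_map, List.range_add, List.map_append,
          List.map_map]
      congr 1
      · refine List.ext_getElem (by simp) ?_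
        intro i h1 h2
        have hlt : start.toNat + i < signal.length := by simp at h2; omega
        simp [Nat.mod_eq_of_lt hlt, List.getD_eq_getElem?_getD, List.getElem?_eq_getElem hlt]
      · refine List.map_congr_left ?_
        intro j _
        have hsl : start.toNat < signal.length := by omega
        have : (start.toNat + (signal.length - start.toNat + j)) % signal.length
            = j % signal.length := by
          rw [show start.toNat + (signal.length - start.toNat + j) = signal.length + j by omega,
            Nat.add_mod_left]
        simp [this]
    rw [fftTailB]
    simp only [← hns, ← hms, if_neg hm, ← hss]
    rw [hbig, PySem.List.slice_to _ (show (0:Int) ≤ m by omega)]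
    -- A's side as a range-indexed map
    rw [fftTail, ← hns, PySem.List.pyRange_one]
    rw [List.map_map]
    -- truncate B's range map to m.toNat, then compare elementwise
    have hfd := PySem.Int.floordiv_mul_add_mod m n
    have hmod0 : 0 ≤ PySem.Int.mod m n := PySem.Int.mod_nonneg _ hnpos
    have hmodlt : PySem.Int.mod m n < n := PySem.Int.mod_lt _ hnpos
    have hq0 : 0 ≤ PySem.Int.floordiv m n := by
      have := (PySem.Int.le_floordiv_iff_mul_le (a := m) (b := n) (q := 0) hnpos).mpr (by omega)
      omega
    have hsl : start.toNat ≤ signal.length := by omega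
    have hlen : m.toNat ≤ (signal.length - start.toNat) + (PySem.Int.floordiv m n + 1).toNat * signal.length := by
      have key : (m.toNat : Int) ≤ ((signal.length - start.toNat : ℕ) : Int)
          + ((PySem.Int.floordiv m n + 1).toNat : Int) * (signal.length : Int) := by
        rw [Int.toNat_of_nonneg (by omega : (0:Int) ≤ m),
            show ((PySem.Int.floordiv m n + 1).toNat : Int) = PySem.Int.floordiv m n + 1 by omega]
        push_cast [Nat.cast_sub hsl]
        nlinarith [hfd, hmod0, hmodlt, hstartn, hstart0]
      exact_mod_cast key
    rw [← List.map_take, List.take_range, Nat.min_eq_left hlen]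
    refine List.map_congr_left ?_
    intro j _
    have hstart_emod : start = offset % n := PySem.Int.mod_eq_emod_of_pos hnpos
    have hmodeq : PySem.Int.mod (offset + (j : Int)) n
        = (((start.toNat + j) % signal.length : ℕ) : Int) := by
      rw [PySem.Int.mod_eq_emod_of_pos hnpos]
      have hsplit : offset + (j : Int) = (start + (j : Int)) + n * (offset / n) := by
        rw [hstart_emod]
        have := Int.emod_add_mul_ediv offset n
        ring_nf
        omega
      rw [hsplit, Int.add_mul_emod_self_left]
      push_cast
      rw [Int.toNat_of_nonneg hstart0]
    simp only [Function.comp, hmodeq, PySem.List.pyGetD_natCast]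
-- ===== VERDICT (by name: the statement is the Claim_ definition above) =====
theorem fft_second_half_of_input_spec : Claim_equal_fft_second_half_of_input := by
  intro signal reps offset rounds _ hpre
  unfold Spec_fft_second_half_of_input fft_second_half_of_input fft_second_half_of_input_alt
  rw [tail_eq signal reps offset hpre]
  have h : fftRoundB = fftRoundA := by
    funext l; rw [fftRoundB_eq, fftRoundA_eq]
  rw [h]
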